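-- pv_equiv track=rewrite | github.com/rafelafrance/digi_leap_old | digi_leap/pylib/ocr_results.py | _char_options
-- ===== SOURCE A (Python) =====
-- import unicodedata
-- from collections import Counter
--
-- _CATEGORY = {
--     "Lu": 20,
--     "Ll": 20,
--     "Lt": 20,
--     "Lm": 20,
--     "Lo": 20,
--     "Nd": 30,
--     "Nl": 60,
--     "No": 60,
--     "Pc": 70,
--     "Pd": 40,
--     "Ps": 50,
--     "Pe": 50,
--     "Pi": 50,
--     "Pf": 50,
--     "Po": 10,
--     "Sm": 99,
--     "Sc": 90,
--     "So": 90,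
--     "Zs": 80,
-- }
--
-- _PO = {
--     ".": 1,
--     ",": 2,
--     ":": 2,
--     ";": 2,
--     "!": 5,
--     '"': 5,
--     "'": 5,
--     "*": 5,
--     "/": 5,
--     "%": 6,
--     "&": 6,
-- }
--
-- def _char_key(char):
--     """Get the character sort order."""
--     order = _CATEGORY.get(unicodedata.category(char), 100)
--     order = _PO.get(char, order)
--     return order, char
--
-- def _char_options(aligned):
--     options = []
--     str_len = len(aligned[0])
--
--     for i in range(str_len):
--         counts = Counter(s[i] for s in aligned).most_common()
--         count = counts[0][1]
--         chars = [c[0] for c in counts if c[1] == count]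
--         chars = sorted(chars, key=_char_key)  # Sort order is a fallback
--         options.append(chars)
--     return options
-- ===== SOURCE B (Python) =====
-- import unicodedata
--
-- _CATEGORY = {
--     "Lu": 20, "Ll": 20, "Lt": 20, "Lm": 20, "Lo": 20,
--     "Nd": 30, "Nl": 60, "No": 60,
--     "Pc": 70, "Pd": 40, "Ps": 50, "Pe": 50, "Pi": 50, "Pf": 50, "Po": 10,
--     "Sm": 99, "Sc": 90, "So": 90, "Zs": 80,
-- }
--
-- _PO = {
--     ".": 1, ",": 2, ":": 2, ";": 2,
--     "!": 5, '"': 5, "'": 5, "*": 5, "/": 5,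
--     "%": 6, "&": 6,
-- }
--
-- def _char_key(char):
--     """Get the character sort order."""
--     order = _CATEGORY.get(unicodedata.category(char), 100)
--     order = _PO.get(char, order)
--     return order, char
--
-- def _char_options(aligned):
--     # Sort-then-scan: sort each column by _char_key, then one linear sweep over
--     # the runs of equal characters keeps the heads of the longest runs.  Because
--     # the column is sorted by _char_key, the surviving heads come out already in
--     # _char_key order -- no counting table and no final sort are needed.
--     options = []
--     for i in range(len(aligned[0])):
--         col = sorted((s[i] for s in aligned), key=_char_key)
--         best = 0
--         chars = []
--         j = 0
--         while j < len(col):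
--             k = j
--             while k < len(col) and col[k] == col[j]:
--                 k += 1
--             run = k - j
--             if run > best:
--                 best = run
--                 chars = [col[j]]
--             elif run == best:
--                 chars.append(col[j])
--             j = k
--         options.append(chars)
--     return options
-- ===== Notes on version B (the rewrite author's own statement) =====
-- stated objective: alternative
-- what changed: Replaces A's hash-counting (Counter per column, most_common, filter top count, then sort the ties) by sort-then-scan: each column is sorted once by _char_key and a single run-length sweep keeps the heads of the longest runs, which emerge already in _char_key order, so no counting table and no final sort exist in B.
import Mathlib
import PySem

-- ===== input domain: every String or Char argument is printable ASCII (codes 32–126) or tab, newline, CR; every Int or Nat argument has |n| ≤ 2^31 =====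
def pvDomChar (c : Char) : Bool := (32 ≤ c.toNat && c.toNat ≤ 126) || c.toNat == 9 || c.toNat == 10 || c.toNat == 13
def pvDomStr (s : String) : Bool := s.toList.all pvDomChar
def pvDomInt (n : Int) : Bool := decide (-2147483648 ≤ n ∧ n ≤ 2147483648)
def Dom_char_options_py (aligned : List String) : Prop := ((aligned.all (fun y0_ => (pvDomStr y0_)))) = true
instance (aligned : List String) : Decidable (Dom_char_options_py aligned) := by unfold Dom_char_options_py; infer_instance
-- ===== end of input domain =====

-- B replaces A's Counter/most_common counting by sort-then-scan: each column is sorted once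
-- by _char_key and one run-length sweep keeps the heads of the longest runs (alternative algorithm).


-- ===== PORT A =====
-- _char_key's order component: _CATEGORY.get(unicodedata.category(char),100) overridden by _PO.get(char,·),
-- tabulated for the printable-ASCII + tab/newline/CR domain (exact there; shared helper of A and B).
def charOrder (c : Char) : Int :=
  if c == '.' then 1
  else if c == ',' || c == ':' || c == ';' then 2
  else if c == '!' || c == '"' || c == '\'' || c == '*' || c == '/' then 5
  else if c == '%' || c == '&' then 6
  else if c == '#' || c == '?' || c == '@' || c == '\\' then 10
  else if (65 ≤ c.toNat && c.toNat ≤ 90) || (97 ≤ c.toNat && c.toNat ≤ 122) then 20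
  else if 48 ≤ c.toNat && c.toNat ≤ 57 then 30
  else if c == '-' then 40
  else if c == '(' || c == ')' || c == '[' || c == ']' || c == '{' || c == '}' then 50
  else if c == '_' then 70
  else if c == ' ' then 80
  else if c == '$' then 90
  else if c == '+' || c == '<' || c == '=' || c == '>' || c == '|' || c == '~' then 99
  else 100

-- s[i] for 0 ≤ i (IndexError = none; the ' ' default is only reached outside Pre_)
def chAt (s : String) (i : Nat) : Char := (PySem.Str.pyGet? s (i : Int)).getD ' '

def char_options_py (aligned : List String) : List (List String) :=
  let str_len := ((PySem.List.pyGet? aligned 0).getD "").toList.length  -- len(aligned[0]) as a Nat for range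
  (List.range str_len).foldl (fun options i =>
    let counts := PySem.List.sorted
      (PySem.Dict.counter (aligned.map (fun s => chAt s i))).items (fun p => p.2) true
    let count := ((PySem.List.pyGet? counts 0).getD (' ', 0)).2
    let chars := (counts.filter (fun c => c.2 == count)).map (fun c => c.1)
    let chars := PySem.List.sorted2 chars charOrder (fun c => c)
    options ++ [chars.map (fun c => String.ofList [c])]) []

-- ===== PORT B =====
-- Source B's while-loop run sweep over the sorted column: advance past the run of col[j],
-- compare its length with the best so far, reset / extend the kept heads accordingly.
def runScan (col : List Char) (best : Nat) (chars : List Char) : List Char :=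
  match col with
  | [] => chars
  | c :: rest =>
      let run := 1 + (rest.takeWhile (· == c)).length   -- k - j
      let rest' := rest.dropWhile (· == c)              -- j = k
      if best < run then runScan rest' run [c]
      else if run == best then runScan rest' best (chars ++ [c])
      else runScan rest' best chars
termination_by col.length
decreasing_by
  all_goals exact Nat.lt_succ_of_le (List.length_dropWhile_le _ _)

def char_options_py_alt (aligned : List String) : List (List String) :=
  let str_len := ((PySem.List.pyGet? aligned 0).getD "").toList.length  -- len(aligned[0]) as a Nat for range
  (List.range str_len).foldl (fun options i =>
    let col := PySem.List.sorted2 (aligned.map (fun s => chAt s i)) charOrder (fun c => c)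
    options ++ [(runScan col 0 []).map (fun c => String.ofList [c])]) []

-- ===== PRECONDITION & SPEC =====
-- Pre_ excludes exactly the inputs where A raises IndexError: the empty list (aligned[0])
-- and lists containing a string shorter than aligned[0] (s[i]).
def Pre_char_options_py (aligned : List String) : Prop :=
  aligned ≠ [] ∧ ∀ s ∈ aligned, (aligned.headD "").toList.length ≤ s.toList.length
instance (aligned : List String) : Decidable (Pre_char_options_py aligned) := by
  unfold Pre_char_options_py; infer_instance

def pvWitness_char_options_py : List String := ["ab1", "aa."]

def Spec_char_options_py (aligned : List String) (out : List (List String)) : Prop :=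
  out = char_options_py_alt aligned
instance (aligned : List String) (out : List (List String)) : Decidable (Spec_char_options_py aligned out) := by
  unfold Spec_char_options_py; infer_instance

-- ===== CLAIM (what is proved, stated in full; the proofs are below) =====
def Claim_equal_char_options_py : Prop := ∀ (aligned : List String), Dom_char_options_py aligned → Pre_char_options_py aligned → Spec_char_options_py aligned (char_options_py aligned)

-- ===== LEMMAS AND PROOFS =====

-- the sort key of _char_key as one lexicographic key
def lexKey (c : Char) : Lex (Int × Char) := toLex (charOrder c, c)

lemma lexKey_inj : Function.Injective lexKey := by
  intro a b h
  have : (ofLex (lexKey a)).2 = (ofLex (lexKey b)).2 := by rw [h]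
  simpa [lexKey] using this

-- sorted(…, key=_char_key) is a single-key sort under lexKey
lemma sorted2_eq (xs : List Char) :
    PySem.List.sorted2 xs charOrder (fun c => c) = PySem.List.sorted xs lexKey := by
  simp only [PySem.List.sorted2, PySem.List.sorted, if_neg (by decide : ¬ (false = true))]
  have hb : (fun a b => decide (charOrder a < charOrder b) ||
        (!decide (charOrder b < charOrder a) && decide (a < b)))
      = fun a b => decide (lexKey a < lexKey b) := by
    funext a b
    by_cases h1 : charOrder a < charOrder b <;>
      by_cases h2 : charOrder b < charOrder a <;>
        by_cases h3 : a < b <;>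
          simp [lexKey, Prod.Lex.lt_iff, h1, h2, h3] <;> omega
  rw [hb]

-- the runs of a list: (head, length) of each maximal block of equal adjacent chars
def runsF (l : List Char) : List (Char × Nat) :=
  match l with
  | [] => []
  | c :: rest => (c, 1 + (rest.takeWhile (· == c)).length) :: runsF (rest.dropWhile (· == c))
termination_by l.length
decreasing_by
  exact Nat.lt_succ_of_le (List.length_dropWhile_le _ _)

def maxRunL (l : List (Char × Nat)) : Nat := l.foldr (fun p m => max p.2 m) 0

lemma le_maxRunL {l : List (Char × Nat)} {p : Char × Nat} (h : p ∈ l) : p.2 ≤ maxRunL l := by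
  induction l with
  | nil => cases h
  | cons q t ih =>
    simp only [maxRunL, List.foldr_cons]
    rcases List.mem_cons.mp h with rfl | h
    · omega
    · have := ih h
      simp only [maxRunL] at this
      omega

lemma maxRunL_mem {l : List (Char × Nat)} (h : l ≠ []) : ∃ p ∈ l, maxRunL l = p.2 := by
  induction l with
  | nil => exact absurd rfl h
  | cons q t ih =>
    by_cases ht : t = []
    · subst ht; exact ⟨q, List.mem_cons_self, by simp [maxRunL]⟩
    · obtain ⟨p, hp, hpe⟩ := ih ht
      simp only [maxRunL, List.foldr_cons] at hpe ⊢
      by_cases hle : List.foldr (fun p m => max p.2 m) 0 t ≤ q.2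
      · exact ⟨q, List.mem_cons_self, by omega⟩
      · exact ⟨p, List.mem_cons_of_mem _ hp, by omega⟩

lemma maxRunL_cons (c : Char) (r : Nat) (l : List (Char × Nat)) :
    maxRunL ((c, r) :: l) = max r (maxRunL l) := by simp [maxRunL]




lemma runScan_eq_aux (n : Nat) : ∀ (ys : List Char), ys.length ≤ n → ∀ (best : Nat) (chars : List Char),
    runScan ys best chars =
      (if best < maxRunL (runsF ys) then [] else chars)
        ++ ((runsF ys).filter
              (fun p => p.2 == max best (maxRunL (runsF ys)))).map Prod.fst := by
  induction n with
  | zero =>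
    intro ys hlen best chars
    have : ys = [] := List.eq_nil_of_length_eq_zero (Nat.le_zero.mp hlen)
    subst this
    simp [runScan, runsF, maxRunL]
  | succ n ih =>
    intro ys hlen best chars
    match ys with
    | [] => simp [runScan, runsF, maxRunL]
    | c :: rest =>
      rw [runScan, runsF]
      have hlen' : (rest.dropWhile (· == c)).length ≤ n := by
        have h1 := List.length_dropWhile_le (· == c) rest
        have h2 : rest.length + 1 ≤ n + 1 := by simpa using hlen
        omega
      rw [maxRunL_cons]
      by_cases h : best < 1 + (rest.takeWhile (· == c)).length
      · rw [if_pos h, ih _ hlen']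
        by_cases h2 : 1 + (rest.takeWhile (· == c)).length < maxRunL (runsF (rest.dropWhile (· == c)))
        · rw [Nat.max_eq_right h2.le, Nat.max_eq_right (by omega :
              best ≤ maxRunL (runsF (rest.dropWhile (· == c)))),
            if_pos h2, if_pos (by omega), List.nil_append, List.nil_append,
            List.filter_cons_of_neg (by simp; omega)]
        · rw [Nat.max_eq_left (by omega :
              maxRunL (runsF (rest.dropWhile (· == c))) ≤ 1 + (rest.takeWhile (· == c)).length),
            Nat.max_eq_right h.le, if_neg h2, if_pos h,
            List.filter_cons_of_pos (by simp), List.nil_append]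
          simp
      · rw [if_neg h]
        by_cases heq : (1 + (rest.takeWhile (· == c)).length == best) = true
        · have hrb : 1 + (rest.takeWhile (· == c)).length = best := by simpa using heq
          rw [if_pos heq, ih _ hlen', hrb, ← Nat.max_assoc, Nat.max_self]
          by_cases hb : best < maxRunL (runsF (rest.dropWhile (· == c)))
          · rw [Nat.max_eq_right hb.le, if_pos hb, if_pos hb, List.nil_append, List.nil_append,
              List.filter_cons_of_neg (by simp; omega)]
          · rw [Nat.max_eq_left (by omega), if_neg hb, if_neg (by omega),
              List.filter_cons_of_pos (by simp)]
            simp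
        · have hrb : 1 + (rest.takeWhile (· == c)).length < best := by
            have : 1 + (rest.takeWhile (· == c)).length ≠ best := by simpa using heq
            omega
          rw [if_neg heq, ih _ hlen', ← Nat.max_assoc, Nat.max_eq_left hrb.le]
          by_cases hb : best < maxRunL (runsF (rest.dropWhile (· == c)))
          · rw [Nat.max_eq_right (by omega :
                1 + (rest.takeWhile (· == c)).length ≤ maxRunL (runsF (rest.dropWhile (· == c)))),
              if_pos hb, List.nil_append, List.nil_append,
              List.filter_cons_of_neg (by
                have := Nat.le_max_left best (maxRunL (runsF (rest.dropWhile (· == c))))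
                simp; omega)]
          · have hx : max (1 + (rest.takeWhile (· == c)).length)
                (maxRunL (runsF (rest.dropWhile (· == c)))) ≤ best :=
              Nat.max_le.mpr ⟨by omega, by omega⟩
            rw [if_neg hb, if_neg (by omega),
              List.filter_cons_of_neg (by
                have := Nat.le_max_left best (maxRunL (runsF (rest.dropWhile (· == c))))
                simp; omega)]

lemma runScan_eq (ys : List Char) (best : Nat) (chars : List Char) :
    runScan ys best chars =
      (if best < maxRunL (runsF ys) then [] else chars)
        ++ ((runsF ys).filter
              (fun p => p.2 == max best (maxRunL (runsF ys)))).map Prod.fst :=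
  runScan_eq_aux ys.length ys le_rfl best chars

-- the three facts about runs of a key-sorted list: run lengths are counts,
-- run heads are strictly key-increasing, and run heads are the members
lemma runs_grouped (ys : List Char) :
    ys.Pairwise (fun a b => lexKey a ≤ lexKey b) →
    (∀ p ∈ runsF ys, p.2 = ys.count p.1) ∧
    ((runsF ys).map Prod.fst).Pairwise (fun a b => lexKey a < lexKey b) ∧
    (∀ c, c ∈ (runsF ys).map Prod.fst ↔ c ∈ ys) := by
  induction ys using runsF.induct with
  | case1 => intro _; rw [runsF]; refine ⟨by simp, by simp, by simp⟩
  | case2 c rest ih =>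
    intro hp
    set take := rest.takeWhile (· == c) with htake
    set t := rest.dropWhile (· == c) with ht
    have hsplit : take ++ t = rest := List.takeWhile_append_dropWhile
    have htmem : ∀ e ∈ t, e ∈ rest := fun e he => by
      rw [← hsplit]; exact List.mem_append_right _ he
    have htake_all : ∀ e ∈ take, e = c := by
      intro e he
      have hbe : (e == c) = true := List.mem_takeWhile_imp (p := fun x => x == c) (htake ▸ he)
      exact eq_of_beq hbe
    have hpt : t.Pairwise (fun a b => lexKey a ≤ lexKey b) :=
      List.Pairwise.sublist
        ((List.dropWhile_sublist (· == c)).trans (List.sublist_cons_self c rest)) hp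
    have hps : ∀ e ∈ rest, lexKey c ≤ lexKey e := by
      intro e he; exact (List.pairwise_cons.mp hp).1 e he
    -- every element of t has key strictly above c's
    have hgt : ∀ e ∈ t, lexKey c < lexKey e := by
      intro e he
      cases hcase : t with
      | nil => rw [hcase] at he; cases he
      | cons d t' =>
        have hd : ¬ (d == c) = true := by
          have := List.head?_dropWhile_not (· == c) rest
          rw [← ht, hcase] at this; simpa using this
        have hdc : d ≠ c := by simpa using hd
        have hcd : lexKey c < lexKey d :=
          lt_of_le_of_ne (hps d (htmem d (hcase ▸ List.mem_cons_self)))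
            (fun hk => hdc (lexKey_inj hk.symm))
        rw [hcase] at he
        rcases List.mem_cons.mp he with rfl | he'
        · exact hcd
        · exact lt_of_lt_of_le hcd
            ((List.pairwise_cons.mp (hcase ▸ hpt)).1 e he')
    have hcnot : c ∉ t := fun hc => lt_irrefl _ (hgt c hc)
    obtain ⟨ih1, ih2, ih3⟩ := ih hpt
    refine ⟨?_, ?_, ?_⟩
    · intro p hp'
      rw [runsF] at hp'
      rcases List.mem_cons.mp hp' with rfl | hp'
      · -- head run: count c = 1 + take.length
        simp only [← htake]
        have h1 : take.count c = take.length :=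
          List.count_eq_length.mpr (fun b hb => (htake_all b hb).symm)
        have h2 : t.count c = 0 := List.count_eq_zero.mpr hcnot
        rw [List.count_cons_self, ← hsplit, List.count_append, h1, h2]
        omega
      · have := ih1 p hp'
        rw [this]
        have hpc : p.1 ≠ c := by
          intro he
          have : p.1 ∈ t := (ih3 p.1).mp (List.mem_map_of_mem hp')
          exact hcnot (he ▸ this)
        have h1 : take.count p.1 = 0 :=
          List.count_eq_zero.mpr (fun hmem => hpc (htake_all _ hmem))
        rw [List.count_cons_of_ne hpc.symm, ← hsplit, List.count_append, h1, Nat.zero_add]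
    · rw [runsF]
      simp only [← htake, ← ht, List.map_cons]
      refine List.pairwise_cons.mpr ⟨?_, ih2⟩
      intro b hb
      exact hgt b ((ih3 b).mp hb)
    · intro e
      rw [runsF]
      simp only [← htake, ← ht, List.map_cons, List.mem_cons, ih3]
      constructor
      · rintro (rfl | he)
        · exact Or.inl rfl
        · exact Or.inr (htmem e he)
      · rintro (rfl | he)
        · exact Or.inl rfl
        · rw [← hsplit] at he
          rcases List.mem_append.mp he with h | h
          · exact Or.inl (htake_all e h)
          · exact Or.inr h

-- A's per-column computation, named
def aColumn (xs : List Char) : List String :=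
  let counts := PySem.List.sorted (PySem.Dict.counter xs).items (fun p => p.2) true
  let count := ((PySem.List.pyGet? counts 0).getD (' ', 0)).2
  let chars := (counts.filter (fun c => c.2 == count)).map (fun c => c.1)
  (PySem.List.sorted2 chars charOrder (fun c => c)).map (fun c => String.ofList [c])

-- per column, A's Counter/most_common/filter/sort equals B's sort-then-run-sweep
lemma columnEq (xs : List Char) :
    aColumn xs
      = (runScan (PySem.List.sorted2 xs charOrder (fun c => c)) 0 []).map
          (fun c => String.ofList [c]) := by
  rcases eq_or_ne xs [] with rfl | hne
  · simp [aColumn, runScan, PySem.Dict.counter, PySem.Dict.empty, PySem.List.sorted,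
      PySem.List.sorted2, PySem.List.pyGet?]
  rw [sorted2_eq]
  set ys := PySem.List.sorted xs lexKey with hys
  have hperm : ys.Perm xs := PySem.List.sorted_perm xs lexKey false
  have hp : ys.Pairwise (fun a b => lexKey a ≤ lexKey b) :=
    PySem.List.sorted_pairwise xs lexKey
  obtain ⟨g1, g2, g3⟩ := runs_grouped ys hp
  set M := maxRunL (runsF ys) with hM
  -- B's column: the run heads of length M
  have hB : runScan ys 0 [] =
      ((runsF ys).filter (fun p => p.2 == M)).map Prod.fst := by
    rw [runScan_eq]
    simp only [← hM, Nat.max_eq_right (Nat.zero_le M)]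
    split_ifs <;> simp
  -- A's side
  set d := PySem.Dict.counter xs with hd
  have hitems : d.items ≠ [] := by
    obtain ⟨x, tl, rfl⟩ := List.exists_cons_of_ne_nil hne
    rw [hd, PySem.Dict.items_counter]
    have hx : x ∈ PySem.Set.ofList (x :: tl) := (PySem.Set.mem_ofList _ x).mpr List.mem_cons_self
    intro hnil
    rcases List.map_eq_nil_iff.mp hnil with h0
    simp [h0] at hx
  have hcounts : PySem.List.sorted d.items (fun p => p.2) true ≠ [] := by
    simpa [PySem.List.sorted_eq_nil_iff] using hitems
  obtain ⟨m, tl, hc⟩ := List.exists_cons_of_ne_nil hcounts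
  have hcperm := PySem.List.sorted_perm d.items (fun p => p.2) true
  have hmax : ∀ y ∈ d.items, y.2 ≤ m.2 :=
    PySem.List.key_head_sorted_rev_ge d.items (fun p => p.2) hc
  have hm_mem : m ∈ d.items := hcperm.mem_iff.mp (hc ▸ List.mem_cons_self)
  have hitems_iff : ∀ p : Char × Int, p ∈ d.items ↔ p.1 ∈ xs ∧ p.2 = (xs.count p.1 : Int) := by
    intro p
    rw [hd, PySem.Dict.items_counter]
    constructor
    · intro hmem
      obtain ⟨k, hk, hke⟩ := List.mem_map.mp hmem
      obtain rfl := hke.symm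
      exact ⟨(PySem.Set.mem_ofList _ _).mp hk, rfl⟩
    · rintro ⟨h1, h2⟩
      refine List.mem_map.mpr ⟨p.1, (PySem.Set.mem_ofList _ _).mpr h1, ?_⟩
      exact Prod.ext rfl h2.symm
  -- the top count equals the longest run
  have hcount_runs : ∀ c : Char, c ∈ xs → xs.count c = ys.count c := by
    intro c _; exact (hperm.count_eq c).symm
  have hMtop : (m.2 : Int) = (M : Int) := by
    have hysne : ys ≠ [] := by
      intro h0
      exact hne ((h0 ▸ hperm).symm.eq_nil)
    have hrne : runsF ys ≠ [] := by
      obtain ⟨y, yt, hyy⟩ := List.exists_cons_of_ne_nil hysne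
      rw [hyy, runsF]; simp
    -- m.2 ≤ M
    have h1 : m.2 ≤ (M : Int) := by
      obtain ⟨hm1, hm2⟩ := (hitems_iff m).mp hm_mem
      have hmy : m.1 ∈ ys := hperm.mem_iff.mpr hm1
      obtain ⟨p, hpmem, hpf⟩ := List.mem_map.mp ((g3 m.1).mpr hmy)
      have : p.2 = ys.count p.1 := g1 p hpmem
      have hle : p.2 ≤ M := le_maxRunL hpmem
      rw [hm2, hcount_runs m.1 hm1, ← hpf, ← this]
      exact_mod_cast hle
    -- M ≤ m.2
    have h2 : (M : Int) ≤ m.2 := by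
      obtain ⟨p, hpmem, hpe⟩ := maxRunL_mem hrne
      have hcnt : p.2 = ys.count p.1 := g1 p hpmem
      have hmem : p.1 ∈ ys := (g3 p.1).mp (List.mem_map_of_mem hpmem)
      have hmemx : p.1 ∈ xs := hperm.mem_iff.mp hmem
      have : (p.1, (xs.count p.1 : Int)) ∈ d.items :=
        (hitems_iff _).mpr ⟨hmemx, rfl⟩
      have := hmax _ this
      rw [hM, hpe, hcnt, ← hcount_runs p.1 hmemx]
      exact_mod_cast this
    omega
  -- assemble
  unfold aColumn
  simp only [← hd, hc, PySem.List.pyGet?_zero_cons, Option.getD_some, hB]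
  congr 1
  set winners := ((runsF ys).filter (fun p => p.2 == M)).map Prod.fst with hw
  set achars := (((m :: tl).filter (fun c => c.2 == m.2)).map (fun c => c.1)) with ha
  have hwlt : winners.Pairwise (fun a b => lexKey a < lexKey b) :=
    List.Pairwise.sublist (List.Sublist.map Prod.fst List.filter_sublist) g2
  have hwnodup : winners.Nodup :=
    hwlt.imp (fun {a b} hab => by rintro rfl; exact lt_irrefl _ hab)
  have hanodup : achars.Nodup := by
    have hkeys : (d.items.map Prod.fst).Nodup := by
      rw [hd, PySem.Dict.items_counter, List.map_map]
      simp only [Function.comp_def]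
      simp [PySem.Set.nodup_ofList xs]
    have hcn : ((m :: tl).map Prod.fst).Nodup :=
      ((hc ▸ hcperm).map Prod.fst).nodup_iff.mpr hkeys
    exact List.Nodup.sublist (List.Sublist.map Prod.fst List.filter_sublist) hcn
  have hmemiff : ∀ c, c ∈ winners ↔ c ∈ achars := by
    intro c
    have hwin : c ∈ winners ↔ c ∈ xs ∧ xs.count c = M := by
      rw [hw]
      constructor
      · intro hcm
        obtain ⟨p, hpmem, hpf⟩ := List.mem_map.mp hcm
        obtain ⟨hp1, hp2⟩ := List.mem_filter.mp hpmem
        have hcy : p.1 ∈ ys := (g3 p.1).mp (List.mem_map_of_mem hp1)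
        have : p.2 = ys.count p.1 := g1 p hp1
        refine hpf ▸ ⟨hperm.mem_iff.mp hcy, ?_⟩
        rw [hcount_runs p.1 (hperm.mem_iff.mp hcy), ← this]
        simpa using hp2
      · rintro ⟨h1, h2⟩
        have hcy : c ∈ ys := hperm.mem_iff.mpr h1
        obtain ⟨p, hpmem, hpf⟩ := List.mem_map.mp ((g3 c).mpr hcy)
        refine List.mem_map.mpr ⟨p, List.mem_filter.mpr ⟨hpmem, ?_⟩, hpf⟩
        have : p.2 = ys.count p.1 := g1 p hpmem
        rw [this, hpf, ← hcount_runs c h1, h2]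
        simp
    have hach : c ∈ achars ↔ c ∈ xs ∧ xs.count c = M := by
      rw [ha]
      constructor
      · intro hcm
        obtain ⟨p, hpmem, hpf⟩ := List.mem_map.mp hcm
        obtain ⟨hp1, hp2⟩ := List.mem_filter.mp hpmem
        have hpi : p ∈ d.items := (hc ▸ hcperm).mem_iff.mp hp1
        obtain ⟨h1, h2⟩ := (hitems_iff p).mp hpi
        refine hpf ▸ ⟨h1, ?_⟩
        have : p.2 = m.2 := by simpa using hp2
        have : (xs.count p.1 : Int) = (M : Int) := by rw [← h2, this, hMtop]
        exact_mod_cast this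
      · rintro ⟨h1, h2⟩
        have hpi : ((c, (xs.count c : Int)) : Char × Int) ∈ d.items :=
          (hitems_iff _).mpr ⟨h1, rfl⟩
        have hpc : ((c, (xs.count c : Int)) : Char × Int) ∈ m :: tl :=
          (hc ▸ hcperm).mem_iff.mpr hpi
        refine List.mem_map.mpr ⟨(c, (xs.count c : Int)), List.mem_filter.mpr ⟨hpc, ?_⟩, rfl⟩
        have : (xs.count c : Int) = m.2 := by rw [h2, hMtop]
        simpa using this
    rw [hwin, hach]
  have hwperm : winners.Perm achars :=
    (List.perm_ext_iff_of_nodup hwnodup hanodup).mpr hmemiff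
  rw [sorted2_eq]
  exact PySem.List.sorted_eq_of_perm_of_pairwise_lt _ _ _ hwperm hwlt

-- ===== VERDICT (by name: the statement is the Claim_ definition above) =====
theorem char_options_py_spec : Claim_equal_char_options_py := by
  intro aligned _ _
  unfold Spec_char_options_py char_options_py char_options_py_alt
  rw [PySem.List.foldl_append_singleton_eq_map, PySem.List.foldl_append_singleton_eq_map]
  simp only [List.nil_append]
  apply List.map_congr_left
  intro i _
  exact columnEq (aligned.map (fun s => chAt s i))
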